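-- pv_equiv track=rewrite | github.com/asyomei/py3rbot | py3rbot/utils.py | code_args_split
-- ===== SOURCE A (Python) =====
-- def code_args_split(text: str) -> tuple[str, str]:
--     if not (text := text.strip()):
--         return "", ""
--
--     args = ""
--
--     while True:
--         arg, *sub = text.split(maxsplit=1)
--         if not arg.startswith("/"):
--             return text, args
--         args += "".join(filter(str.isalpha, arg))
--         if not sub:
--             return "", args
--         text ,= sub
-- ===== SOURCE B (Python) =====
-- def code_args_split(text: str) -> tuple[str, str]:
--     text = text.strip()
--     i, n = 0, len(text)
--     # single char-level scan: advance i past the leading run of '/'-prefixed tokens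
--     while i < n and text[i] == '/':
--         while i < n and not text[i].isspace():
--             i += 1
--         while i < n and text[i].isspace():
--             i += 1
--     return text[i:], ''.join(c for c in text[:i] if c.isalpha())
-- ===== Notes on version B (the rewrite author's own statement) =====
-- stated objective: simpler
-- what changed: A peels one token per iteration with text.split(maxsplit=1) and re-enters the loop on the remainder string; B makes a single char-level index scan that finds the boundary of the leading run of '/'-prefixed tokens and then slices the stripped text once at that index (remainder = text[i:], args = letters of text[:i]).
import Mathlib
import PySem

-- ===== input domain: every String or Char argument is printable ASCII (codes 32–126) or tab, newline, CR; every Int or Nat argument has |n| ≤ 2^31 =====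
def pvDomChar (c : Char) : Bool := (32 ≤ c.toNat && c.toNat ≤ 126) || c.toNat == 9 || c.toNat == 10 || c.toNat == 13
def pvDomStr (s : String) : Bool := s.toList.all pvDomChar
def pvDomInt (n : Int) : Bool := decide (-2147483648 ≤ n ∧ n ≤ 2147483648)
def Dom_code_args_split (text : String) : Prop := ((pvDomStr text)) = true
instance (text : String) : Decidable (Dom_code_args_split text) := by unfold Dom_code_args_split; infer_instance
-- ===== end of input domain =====

-- B replaces A's peel-one-token-with-split()-and-reloop decomposition by a single char-level
-- scan that finds the boundary index of the leading '/'-token run and slices there once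
-- (objective: simpler; same asymptotic cost).

-- ===== PORT A =====
-- A's 'while True' loop: 'arg, *sub = text.split(maxsplit=1)'; the fuel argument only makes the
-- recursion structural (each iteration consumes at least one character, so fuel = length suffices).
def codeArgsLoopA : Nat → List Char → List Char → List Char × List Char
  | 0, _, args => ([], args)          -- fuel guard; never reached from the entry point
  | fuel + 1, cs, args =>
    match PySem.Chars.split₀Max cs 1 with
    | [] => ([], args)                -- Python raises ValueError here; unreachable from the entry point
    | arg :: sub =>
      if ¬ PySem.Chars.startswith arg ['/'] then (cs, args)
      else
        let args' := args ++ arg.filter PySem.Chars.isalpha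
        match sub with
        | [] => ([], args')
        | s :: _ => codeArgsLoopA fuel s args'
def code_args_split (text : String) : String × String :=
  let cs := PySem.Chars.strip text.toList
  if cs = [] then ("", "")
  else
    let r := codeArgsLoopA cs.length cs []
    (String.ofList r.1, String.ofList r.2)

-- ===== PORT B =====
-- B's inner "while i < n and p(text[i]): i += 1" loops, as (consumed chars, rest).
def codeArgsSpan (p : Char → Bool) : List Char → List Char × List Char
  | [] => ([], [])
  | c :: cs =>
    if p c then
      let r := codeArgsSpan p cs
      (c :: r.1, r.2)
    else ([], c :: cs)
-- termination helper for the outer scan below (cited by name in its decreasing_by)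
theorem codeArgsSpan_eq (p : Char → Bool) (l : List Char) :
    codeArgsSpan p l = (l.takeWhile p, l.dropWhile p) := by
  induction l with
  | nil => rfl
  | cons c cs ih =>
    simp only [codeArgsSpan, List.takeWhile, List.dropWhile]
    cases h : p c <;> simp [ih]
-- B's outer while loop: consume the leading run of '/'-prefixed tokens (each with the
-- whitespace after it); returns (consumed prefix text[:i], remainder text[i:]).
def codeArgsScan : List Char → List Char × List Char
  | [] => ([], [])
  | c :: cs =>
    if hc : c = '/' then
      let t := codeArgsSpan (fun d => ! PySem.Chars.isspace d) (c :: cs)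
      let w := codeArgsSpan PySem.Chars.isspace t.2
      let r := codeArgsScan w.2
      (t.1 ++ w.1 ++ r.1, r.2)
    else ([], c :: cs)
termination_by cs => cs.length
decreasing_by
  simp only [codeArgsSpan_eq]
  have h1 : (List.dropWhile (fun d => ! PySem.Chars.isspace d) (c :: cs)).length ≤ cs.length := by
    rw [List.dropWhile_cons_of_pos (by simp [hc]; decide)]
    exact List.length_dropWhile_le _ cs
  have h2 := List.length_dropWhile_le PySem.Chars.isspace
      (List.dropWhile (fun d => ! PySem.Chars.isspace d) (c :: cs))
  simp only [List.length_cons]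
  omega

def code_args_split_alt (text : String) : String × String :=
  let cs := PySem.Chars.strip text.toList
  let r := codeArgsScan cs
  (String.ofList r.2, String.ofList (r.1.filter PySem.Chars.isalpha))

-- ===== PRECONDITION & SPEC =====
def Spec_code_args_split (text : String) (out : String × String) : Prop := out = code_args_split_alt text
instance (text : String) (out : String × String) : Decidable (Spec_code_args_split text out) := by unfold Spec_code_args_split; infer_instance

-- ===== CLAIM (what is proved, stated in full; the proofs are below) =====
def Claim_equal_code_args_split : Prop := ∀ (text : String), Dom_code_args_split text → Spec_code_args_split text (code_args_split text)

-- ===== LEMMAS AND PROOFS =====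

-- whitespace characters are never alphabetic
theorem isspace_not_isalpha (c : Char) (h : PySem.Chars.isspace c = true) :
    PySem.Chars.isalpha c = false := by
  simp [PySem.Chars.isalpha, PySem.Chars.isspace, PySem.Chars.isupper, PySem.Chars.islower,
        Char.le_def, UInt32.le_iff_toNat_le] at *
  omega
theorem filter_alpha_takeWhile_isspace (l : List Char) :
    (l.takeWhile PySem.Chars.isspace).filter PySem.Chars.isalpha = [] := by
  rw [List.filter_eq_nil_iff]
  intro a ha
  simp [isspace_not_isalpha a (List.mem_takeWhile_imp ha)]
theorem head_false_of_dropWhile_eq_self {p : Char → Bool} {c : Char} {l : List Char}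
    (h : List.dropWhile p (c :: l) = c :: l) : p c = false := by
  by_contra hb
  rw [List.dropWhile_cons_of_pos (by revert hb; cases p c <;> simp)] at h
  have := List.length_dropWhile_le p l
  have := congrArg List.length h
  simp at this; omega
theorem split0Max_one (cs : List Char) (hl : List.dropWhile PySem.Chars.isspace cs = cs)
    (hne : cs ≠ []) :
    PySem.Chars.split₀Max cs 1 =
      (let w := cs.takeWhile (fun d => ! PySem.Chars.isspace d)
       let r := (cs.dropWhile (fun d => ! PySem.Chars.isspace d)).dropWhile PySem.Chars.isspace
       if r = [] then [w] else [w, r]) := by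
  cases cs with
  | nil => simp at hne
  | cons a t =>
    show PySem.Chars.split₀Max.go (t.length + 1 + 1) 1 (a :: t) [] = _
    rw [PySem.Chars.split₀Max.go.eq_def]
    simp only [hl]
    simp only [Nat.succ_ne_zero, reduceIte]
    rw [PySem.Chars.split₀Max.go.eq_def]
    cases hr : List.dropWhile PySem.Chars.isspace
        (List.dropWhile (fun d => ! PySem.Chars.isspace d) (a :: t)) with
    | nil => simp [hr]
    | cons b s => simp [hr]

theorem loop_eq (fuel : Nat) (cs args : List Char)
    (hl : List.dropWhile PySem.Chars.isspace cs = cs) (hf : cs.length ≤ fuel) :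
    codeArgsLoopA fuel cs args =
      ((codeArgsScan cs).2, args ++ (codeArgsScan cs).1.filter PySem.Chars.isalpha) := by
  induction fuel generalizing cs args with
  | zero =>
    have : cs = [] := by cases cs <;> simp_all
    subst this
    simp [codeArgsLoopA, codeArgsScan]
  | succ fuel ih =>
    cases cs with
    | nil =>
      have h0 : PySem.Chars.split₀Max [] 1 = [] := by decide
      simp [codeArgsLoopA, codeArgsScan, h0]
    | cons c rest =>
      have hcw : PySem.Chars.isspace c = false := head_false_of_dropWhile_eq_self hl
      rw [show codeArgsLoopA (fuel+1) (c::rest) args =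
        (match PySem.Chars.split₀Max (c::rest) 1 with
        | [] => ([], args)
        | arg :: sub =>
          if ¬ PySem.Chars.startswith arg ['/'] then (c::rest, args)
          else
            let args' := args ++ arg.filter PySem.Chars.isalpha
            match sub with
            | [] => ([], args')
            | s :: _ => codeArgsLoopA fuel s args') from rfl]
      rw [split0Max_one _ hl (by simp)]
      simp only []
      set w := (c::rest).takeWhile (fun d => ! PySem.Chars.isspace d) with hw
      set rest0 := (c::rest).dropWhile (fun d => ! PySem.Chars.isspace d) with hrest0
      set r := rest0.dropWhile PySem.Chars.isspace with hr
      have hwcons : w = c :: rest.takeWhile (fun d => ! PySem.Chars.isspace d) := by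
        rw [hw, List.takeWhile_cons_of_pos (by simp [hcw])]
      have hstart : PySem.Chars.startswith w ['/'] = (c = '/') := by
        rw [hwcons]; simp [PySem.Chars.startswith, List.isPrefixOf]
        constructor <;> (intro h; exact h.symm)
      have hscan : codeArgsScan (c :: rest) =
          (if c = '/' then
            (w ++ rest0.takeWhile PySem.Chars.isspace ++ (codeArgsScan r).1, (codeArgsScan r).2)
          else ([], c :: rest)) := by
        rw [codeArgsScan.eq_def]
        split
        · simp_all
        · rename_i c' cs' heq
          cases heq
          split_ifs with h <;> simp [codeArgsSpan_eq, hw, hrest0, hr]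
      by_cases hc : c = '/'
      · subst hc
        have hsw : PySem.Chars.startswith w ['/'] = true := by rw [hstart]
        by_cases hre : r = []
        · rw [if_pos hre]
          have hnil : codeArgsScan [] = ([], []) := by rw [codeArgsScan.eq_def]
          simp [hsw, hscan, hre, hnil, filter_alpha_takeWhile_isspace]
        · rw [if_neg hre]
          simp only [hsw, not_true_eq_false, if_false]
          have hl' : List.dropWhile PySem.Chars.isspace r = r := by
            rw [hr]; exact List.dropWhile_idempotent ..
          have hf' : r.length ≤ fuel := by
            have h1 : rest0.length ≤ rest.length := by
              rw [hrest0, List.dropWhile_cons_of_pos (by simp [hcw])]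
              exact List.length_dropWhile_le _ rest
            have h2 : r.length ≤ rest0.length := List.length_dropWhile_le _ rest0
            simp only [List.length_cons] at hf
            omega
          rw [ih r _ hl' hf']
          simp [hscan, filter_alpha_takeWhile_isspace]
      · have hsw : PySem.Chars.startswith w ['/'] = false := by
          cases hb : PySem.Chars.startswith w ['/']
          · rfl
          · exact absurd (hstart ▸ hb) hc
        by_cases hre : r = [] <;> simp [hre, hsw, hscan, hc]

-- being dropWhile-fixed is inherited by prefixes
theorem dropWhile_eq_self_of_prefix {p : Char → Bool} {t l : List Char}
    (hp : t <+: l) (h : List.dropWhile p l = l) : List.dropWhile p t = t := by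
  cases t with
  | nil => simp
  | cons c t' =>
    obtain ⟨s, hs⟩ := hp
    subst hs
    rw [List.dropWhile_cons_of_neg]
    simp [head_false_of_dropWhile_eq_self h]

-- the stripped text has no leading whitespace
theorem strip_dropWhile_fixed (l : List Char) :
    List.dropWhile PySem.Chars.isspace (PySem.Chars.strip l) = PySem.Chars.strip l := by
  unfold PySem.Chars.strip PySem.Chars.rstrip PySem.Chars.lstrip
  apply dropWhile_eq_self_of_prefix (l := List.dropWhile PySem.Chars.isspace l)
  · have h := List.dropWhile_suffix
      (l := (List.dropWhile PySem.Chars.isspace l).reverse) PySem.Chars.isspace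
    exact List.reverse_suffix.mp (by simpa using h)
  · exact List.dropWhile_idempotent ..

-- ===== VERDICT (by name: the statement is the Claim_ definition above) =====
theorem code_args_split_spec : Claim_equal_code_args_split := by
  intro text _
  unfold Spec_code_args_split code_args_split code_args_split_alt
  by_cases h : PySem.Chars.strip text.toList = []
  · have hnil : codeArgsScan [] = ([], []) := by rw [codeArgsScan.eq_def]
    simp [h, hnil]
  · rw [if_neg h]
    rw [loop_eq _ _ _ (strip_dropWhile_fixed _) le_rfl]
    simp
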